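-- pv_equiv track=rewrite | github.com/nawrin15/leetcode-problems | string/1370.Increasing_Decreasing_String.py | sortString2
-- ===== SOURCE A (Python) =====
-- def sortString2(s: str) -> str:
--     s = list(s)
--     result = ''
--     while s:
--         for letter in sorted(set(s)):
--             s.remove(letter)
--             result += letter
--         for letter in sorted(set(s), reverse=True):
--             s.remove(letter)
--             result += letter
--     return result
-- ===== SOURCE B (Python) =====
-- def sortString2(s: str) -> str:
--     counts = {}
--     for ch in s:
--         counts[ch] = counts.get(ch, 0) + 1
--     keys = sorted(counts)
--     out = []
--     remaining = len(s)
--     while remaining: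
--         for ch in keys:
--             if counts[ch]:
--                 counts[ch] -= 1
--                 out.append(ch)
--                 remaining -= 1
--         for ch in reversed(keys):
--             if counts[ch]:
--                 counts[ch] -= 1
--                 out.append(ch)
--                 remaining -= 1
--     return ''.join(out)
-- ===== Notes on version B (the rewrite author's own statement) =====
-- stated objective: faster
-- what changed: Instead of repeatedly rebuilding sorted(set(s)) and calling list.remove (a linear scan) for every emitted character, B builds a character-frequency counter once and sweeps the fixed sorted key list alternately forward and backward, decrementing counts.
import Mathlib
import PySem

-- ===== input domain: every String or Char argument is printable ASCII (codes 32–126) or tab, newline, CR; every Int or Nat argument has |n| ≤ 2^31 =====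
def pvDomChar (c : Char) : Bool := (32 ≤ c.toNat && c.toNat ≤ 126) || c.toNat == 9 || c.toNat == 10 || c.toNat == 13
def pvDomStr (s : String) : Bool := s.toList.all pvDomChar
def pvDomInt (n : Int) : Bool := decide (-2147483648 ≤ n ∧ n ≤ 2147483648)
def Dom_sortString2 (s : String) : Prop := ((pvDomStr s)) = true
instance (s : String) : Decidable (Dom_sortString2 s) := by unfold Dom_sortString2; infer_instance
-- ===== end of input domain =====

-- B replaces A's repeated "sorted(set(s)) + list.remove" rounds by a character counter built once
-- and swept alternately over the fixed sorted key list (objective: faster).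


-- ===== PORT A =====
-- one "for letter in …: s.remove(letter); result += letter" pass (result is modeled as List Char;
-- remove? never returns none here, since each distinct letter is still present, so getD is exact)
def sortString2Pass (letters : List Char) (st : List Char × List Char) : List Char × List Char :=
  letters.foldl (fun st letter =>
    ((PySem.List.remove? st.1 letter).getD st.1, st.2 ++ [letter])) st

-- the "while s:" loop; fuel = initial length of s suffices (each round removes ≥ 1 element)
def sortString2Loop : Nat → List Char → List Char → List Char
  | 0, _, result => result
  | fuel + 1, s, result =>
    if s = [] then result
    else
      let st1 := sortString2Pass (PySem.List.sorted (PySem.Set.ofList s) (fun x => x) false) (s, result)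
      let st2 := sortString2Pass (PySem.List.sorted (PySem.Set.ofList st1.1) (fun x => x) true) st1
      sortString2Loop fuel st2.1 st2.2

def sortString2 (s : String) : String :=
  String.mk (sortString2Loop s.toList.length s.toList [])

-- ===== PORT B =====
-- one "for ch in ks: if counts[ch]: …" sweep over a key list ks; counts[ch] is getD ch 0
-- (every ch ∈ ks is a key of counts, so the lookup never misses; int truthiness = ≠ 0)
def sortString2Sweep (ks : List Char) (st : PySem.Dict Char Int × List Char × Int) :
    PySem.Dict Char Int × List Char × Int :=
  ks.foldl (fun st ch =>
    let c := st.1.getD ch 0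
    if c ≠ 0 then (st.1.insert ch (c - 1), st.2.1 ++ [ch], st.2.2 - 1) else st) st

-- the "while remaining:" loop; fuel = len(s) suffices (each round places ≥ 1 character)
def sortString2AltLoop (keys : List Char) : Nat → PySem.Dict Char Int × List Char × Int → List Char
  | 0, st => st.2.1
  | fuel + 1, st =>
    if st.2.2 ≠ 0 then
      sortString2AltLoop keys fuel (sortString2Sweep keys.reverse (sortString2Sweep keys st))
    else st.2.1

def sortString2_alt (s : String) : String :=
  let counts := s.toList.foldl (fun d ch => d.insert ch (d.getD ch 0 + 1)) PySem.Dict.empty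
  let keys := PySem.List.sorted counts.keys (fun x => x) false
  String.mk (sortString2AltLoop keys s.toList.length (counts, [], (s.toList.length : Int)))

-- ===== PRECONDITION & SPEC =====
def Spec_sortString2 (s : String) (out : String) : Prop := out = sortString2_alt s
instance (s : String) (out : String) : Decidable (Spec_sortString2 s out) := by unfold Spec_sortString2; infer_instance

-- ===== CLAIM (what is proved, stated in full; the proofs are below) =====
def Claim_equal_sortString2 : Prop := ∀ (s : String), Dom_sortString2 s → Spec_sortString2 s (sortString2 s)

-- ===== LEMMAS AND PROOFS =====

theorem pass_spec (l : List Char) (hnd : l.Nodup) :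
    ∀ (s res : List Char), (∀ c ∈ l, c ∈ s) →
      (sortString2Pass l (s, res)).2 = res ++ l ∧
      (sortString2Pass l (s, res)).1.length = s.length - l.length ∧
      ∀ c, (sortString2Pass l (s, res)).1.count c = s.count c - (if c ∈ l then 1 else 0) := by
  induction l with
  | nil => intro s res _; simp [sortString2Pass]
  | cons x l ih =>
    intro s res hsub
    have hx : x ∈ s := hsub x (by simp)
    have hnd' : l.Nodup := hnd.of_cons
    have hxl : x ∉ l := by simp [List.nodup_cons] at hnd; exact hnd.1
    have hstep : sortString2Pass (x :: l) (s, res) = sortString2Pass l (s.erase x, res ++ [x]) := by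
      simp [sortString2Pass, PySem.List.remove?_eq_some_erase s x hx]
    have hsub' : ∀ c ∈ l, c ∈ s.erase x := by
      intro c hc
      exact (List.mem_erase_of_ne (fun h => hxl (by subst h; exact hc))).2 (hsub c (by simp [hc]))
    obtain ⟨h1, h2, h3⟩ := ih hnd' (s.erase x) (res ++ [x]) hsub'
    refine ⟨?_, ?_, ?_⟩
    · rw [hstep, h1]; simp
    · rw [hstep, h2]; have := List.length_erase_of_mem hx; simp only [List.length_cons]; omega
    · intro c
      rw [hstep, h3 c]
      by_cases hcx : c = x
      · subst hcx
        simp [List.count_erase_self, hxl]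
      · simp [List.count_erase_of_ne hcx, hcx]

theorem sweep_spec (K : List Char) (hnd : K.Nodup) :
    ∀ (d : PySem.Dict Char Int) (out : List Char) (r : Int),
      (sortString2Sweep K (d, out, r)).2.1 = out ++ K.filter (fun c => decide (d.getD c 0 ≠ 0)) ∧
      (sortString2Sweep K (d, out, r)).2.2 = r - (K.filter (fun c => decide (d.getD c 0 ≠ 0))).length ∧
      ∀ c, (sortString2Sweep K (d, out, r)).1.getD c 0 =
        d.getD c 0 - (if c ∈ K.filter (fun c => decide (d.getD c 0 ≠ 0)) then 1 else 0) := by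
  induction K with
  | nil => intro d out r; simp [sortString2Sweep]
  | cons x K ih =>
    intro d out r
    have hnd' : K.Nodup := hnd.of_cons
    have hxK : x ∉ K := by simp [List.nodup_cons] at hnd; exact hnd.1
    by_cases hx : d.getD x 0 ≠ 0
    · have hstep : sortString2Sweep (x :: K) (d, out, r) =
          sortString2Sweep K (d.insert x (d.getD x 0 - 1), out ++ [x], r - 1) := by
        simp [sortString2Sweep, hx]
      have hfil : K.filter (fun c => decide ((d.insert x (d.getD x 0 - 1)).getD c 0 ≠ 0)) =
          K.filter (fun c => decide (d.getD c 0 ≠ 0)) := by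
        apply List.filter_congr
        intro c hc
        have : c ≠ x := fun h => hxK (h ▸ hc)
        simp [PySem.Dict.getD_insert, this]
      obtain ⟨h1, h2, h3⟩ := ih hnd' (d.insert x (d.getD x 0 - 1)) (out ++ [x]) (r - 1)
      rw [hfil] at h1 h2 h3
      have hfcons : (x :: K).filter (fun c => decide (d.getD c 0 ≠ 0)) =
          x :: K.filter (fun c => decide (d.getD c 0 ≠ 0)) := by simp [hx]
      refine ⟨?_, ?_, ?_⟩
      · rw [hstep, h1, hfcons]; simp
      · rw [hstep, h2, hfcons]; simp; omega
      · intro c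
        rw [hstep, h3 c, hfcons]
        by_cases hcx : c = x
        · subst hcx
          have hcf : c ∉ K.filter (fun c => decide (d.getD c 0 ≠ 0)) :=
            fun h => hxK (List.mem_of_mem_filter h)
          simp [hxK]
        · simp [PySem.Dict.getD_insert, hcx]
    · rw [not_not] at hx
      have hstep : sortString2Sweep (x :: K) (d, out, r) = sortString2Sweep K (d, out, r) := by
        simp [sortString2Sweep, hx]
      have hfcons : (x :: K).filter (fun c => decide (d.getD c 0 ≠ 0)) =
          K.filter (fun c => decide (d.getD c 0 ≠ 0)) := by simp [hx]
      obtain ⟨h1, h2, h3⟩ := ih hnd' d out r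
      refine ⟨?_, ?_, ?_⟩
      · rw [hstep, h1, hfcons]
      · rw [hstep, h2, hfcons]
      · intro c; rw [hstep, h3 c, hfcons]

theorem filter_eq_sorted_asc (K : List Char) (hK : K.Pairwise (· < ·)) (s : List Char)
    (hsub : ∀ c ∈ s, c ∈ K) :
    K.filter (fun c => decide (c ∈ s)) = PySem.List.sorted (PySem.Set.ofList s) (fun x => x) false := by
  refine (PySem.List.sorted_eq_of_perm_of_pairwise_lt _ _ _ ?_ ?_).symm
  · rw [List.perm_ext_iff_of_nodup ((hK.imp ne_of_lt).filter _) (PySem.Set.nodup_ofList s)]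
    intro a
    simp [PySem.Set.mem_ofList]
    exact fun h => hsub a h
  · exact hK.filter _

theorem filter_eq_sorted_desc (K : List Char) (hK : K.Pairwise (· < ·)) (s : List Char)
    (hsub : ∀ c ∈ s, c ∈ K) :
    K.reverse.filter (fun c => decide (c ∈ s)) =
      PySem.List.sorted (PySem.Set.ofList s) (fun x => x) true := by
  refine (PySem.List.sorted_rev_eq_of_perm_of_pairwise_gt _ _ _ ?_ ?_).symm
  · rw [List.perm_ext_iff_of_nodup ((List.nodup_reverse.mpr (hK.imp ne_of_lt)).filter _) (PySem.Set.nodup_ofList s)]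
    intro a
    simp [PySem.Set.mem_ofList]
    exact fun h => hsub a h
  · exact (List.pairwise_reverse.mpr hK).filter _


theorem loop_eq (K : List Char) (hK : K.Pairwise (· < ·)) :
    ∀ (fuel : Nat) (s : List Char) (d : PySem.Dict Char Int) (out : List Char),
      (∀ c ∈ s, c ∈ K) → (∀ c, d.getD c 0 = (s.count c : Int)) → s.length ≤ fuel →
      sortString2Loop fuel s out = sortString2AltLoop K fuel (d, out, (s.length : Int)) := by
  intro fuel
  induction fuel with
  | zero =>
    intro s d out _ _ hlen
    simp [sortString2Loop, sortString2AltLoop]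
  | succ fuel ih =>
    intro s d out hsub hcnt hlen
    by_cases hs : s = []
    · subst hs
      simp [sortString2Loop, sortString2AltLoop]
    · have hKnd : K.Nodup := hK.imp ne_of_lt
      -- the ascending pass
      set asc := PySem.List.sorted (PySem.Set.ofList s) (fun x => x) false with hasc
      have hascnd : asc.Nodup :=
        ((PySem.List.sorted_perm _ _ _).nodup_iff).mpr (PySem.Set.nodup_ofList s)
      have hascmem : ∀ c, c ∈ asc ↔ c ∈ s := by
        intro c; rw [hasc, PySem.List.mem_sorted, PySem.Set.mem_ofList]
      have hascsub : ∀ c ∈ asc, c ∈ s := fun c hc => (hascmem c).1 hc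
      obtain ⟨pa1, pa2, pa3⟩ := pass_spec asc hascnd s out hascsub
      -- B's first sweep; its filter is asc
      have hfil1 : K.filter (fun c => decide (d.getD c 0 ≠ 0)) = asc := by
        rw [hasc, ← filter_eq_sorted_asc K hK s hsub]
        apply List.filter_congr
        intro c _
        simp [hcnt c, List.count_eq_zero]
      obtain ⟨sb1, sb2, sb3⟩ := sweep_spec K hKnd d out (s.length : Int)
      rw [hfil1] at sb1 sb2 sb3
      set s1 := (sortString2Pass asc (s, out)).1 with hs1
      set d1 := (sortString2Sweep K (d, out, (s.length : Int))).1 with hd1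
      have hcnt1 : ∀ c, d1.getD c 0 = (s1.count c : Int) := by
        intro c
        rw [sb3 c, hcnt c, pa3 c]
        by_cases hc : c ∈ asc
        · have : 0 < s.count c := List.count_pos_iff.mpr ((hascmem c).1 hc)
          simp [hc]; omega
        · simp [hc]
      have hsub1 : ∀ c ∈ s1, c ∈ K := by
        intro c hc
        have h1 : 0 < s1.count c := List.count_pos_iff.mpr hc
        have h2 : 0 < s.count c := by rw [pa3 c] at h1; omega
        exact hsub c (List.count_pos_iff.mp h2)
      -- the descending pass
      set desc := PySem.List.sorted (PySem.Set.ofList s1) (fun x => x) true with hdesc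
      have hdescnd : desc.Nodup :=
        ((PySem.List.sorted_perm _ _ _).nodup_iff).mpr (PySem.Set.nodup_ofList s1)
      have hdescmem : ∀ c, c ∈ desc ↔ c ∈ s1 := by
        intro c; rw [hdesc, PySem.List.mem_sorted, PySem.Set.mem_ofList]
      have hdescsub : ∀ c ∈ desc, c ∈ s1 := fun c hc => (hdescmem c).1 hc
      obtain ⟨qa1, qa2, qa3⟩ := pass_spec desc hdescnd s1 (out ++ asc) hdescsub
      have hfil2 : K.reverse.filter (fun c => decide (d1.getD c 0 ≠ 0)) = desc := by
        rw [hdesc, ← filter_eq_sorted_desc K hK s1 hsub1]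
        apply List.filter_congr
        intro c _
        simp [hcnt1 c, List.count_eq_zero]
      obtain ⟨tb1, tb2, tb3⟩ :=
        sweep_spec K.reverse (List.nodup_reverse.mpr hKnd) d1 (out ++ asc)
          ((s.length : Int) - asc.length)
      rw [hfil2] at tb1 tb2 tb3
      set s2 := (sortString2Pass desc (s1, out ++ asc)).1 with hs2
      set d2 := (sortString2Sweep K.reverse (d1, out ++ asc, (s.length : Int) - asc.length)).1 with hd2
      -- length bookkeeping
      have hascle : asc.length ≤ s.length := (List.subperm_of_subset hascnd hascsub).length_le
      have hdescle : desc.length ≤ s1.length := (List.subperm_of_subset hdescnd hdescsub).length_le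
      have hascne : asc ≠ [] := by
        rw [hasc, Ne, PySem.List.sorted_eq_nil_iff]
        intro h
        obtain ⟨x, hx⟩ := List.exists_mem_of_ne_nil s hs
        exact absurd ((PySem.Set.mem_ofList s x).mpr hx) (by simp [h])
      have hcnt2 : ∀ c, d2.getD c 0 = (s2.count c : Int) := by
        intro c
        rw [tb3 c, hcnt1 c, qa3 c]
        by_cases hc : c ∈ desc
        · have : 0 < s1.count c := List.count_pos_iff.mpr ((hdescmem c).1 hc)
          simp [hc]; omega
        · simp [hc]
      have hsub2 : ∀ c ∈ s2, c ∈ K := by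
        intro c hc
        have h1 : 0 < s2.count c := List.count_pos_iff.mpr hc
        have h2 : 0 < s1.count c := by rw [qa3 c] at h1; omega
        exact hsub1 c (List.count_pos_iff.mp h2)
      have hlen2 : s2.length ≤ fuel := by
        rw [hs2, qa2, pa2]
        have : 0 < asc.length := List.length_pos_iff.mpr hascne
        omega
      -- one step of A's loop
      have hst1 : sortString2Pass asc (s, out) = (s1, out ++ asc) := by
        rw [hs1, ← pa1]
      have hst2 : sortString2Pass desc (s1, out ++ asc) = (s2, out ++ asc ++ desc) := by
        rw [hs2, ← qa1]
      have hA : sortString2Loop (fuel + 1) s out = sortString2Loop fuel s2 (out ++ asc ++ desc) := by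
        rw [sortString2Loop]
        simp only [hs, if_false, ← hasc, hst1, ← hdesc, hst2]
      -- one step of B's loop
      have hsw1 : sortString2Sweep K (d, out, (s.length : Int)) =
          (d1, out ++ asc, (s.length : Int) - asc.length) := by
        rw [hd1, ← sb1, ← sb2]
      have hsw2 : sortString2Sweep K.reverse (d1, out ++ asc, (s.length : Int) - asc.length) =
          (d2, out ++ asc ++ desc, (s.length : Int) - asc.length - desc.length) := by
        rw [hd2, ← tb1, ← tb2]
      have hrne : ((s.length : Int)) ≠ 0 := by
        have : 0 < s.length := List.length_pos_iff.mpr hs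
        omega
      have hB : sortString2AltLoop K (fuel + 1) (d, out, (s.length : Int)) =
          sortString2AltLoop K fuel (d2, out ++ asc ++ desc,
            (s.length : Int) - asc.length - desc.length) := by
        rw [sortString2AltLoop]
        simp only [hrne, ne_eq, not_false_iff, if_true, hsw1, hsw2]
      have hr2 : (s.length : Int) - asc.length - desc.length = (s2.length : Int) := by
        rw [hs2, qa2, pa2]
        omega
      rw [hA, hB, hr2]
      exact ih s2 d2 (out ++ asc ++ desc) hsub2 hcnt2 hlen2

-- ===== VERDICT (by name: the statement is the Claim_ definition above) =====
theorem sortString2_spec : Claim_equal_sortString2 := by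
  unfold Claim_equal_sortString2
  intro s _
  unfold Spec_sortString2 sortString2 sortString2_alt
  simp only [PySem.Dict.foldl_insert_getD_add_one_eq_counter, PySem.Dict.keys_counter]
  congr 1
  apply loop_eq
  · exact PySem.List.sorted_ofList_pairwise_lt s.toList
  · intro c hc
    rw [PySem.List.mem_sorted, PySem.Set.mem_ofList]; exact hc
  · exact fun c => PySem.Dict.getD_counter s.toList c
  · exact le_refl _
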